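-- pv_equiv track=rewrite | github.com/azkalot1/AdvancedBiomedicalAgent | scripts/sync_tables_via_pgrestore.py | _expand_tables_by_dependencies
-- ===== SOURCE A (Python) =====
-- def _expand_tables_by_dependencies(
--     seed_tables: set[str],
--     fk_edges: list[tuple[str, str, str]],
--     mode: str,
--     recursive: bool,
-- ) -> set[str]:
--     selected = set(seed_tables)
--
--     if mode == "none":
--         return selected
--
--     def step(current: set[str]) -> set[str]:
--         additions: set[str] = set()
--         for child, parent, _ in fk_edges:
--             if mode in {"children", "both"} and parent in current:
--                 additions.add(child)
--             if mode in {"parents", "both"} and child in current: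
--                 additions.add(parent)
--         return additions
--
--     if not recursive:
--         selected |= step(selected)
--         return selected
--
--     while True:
--         additions = step(selected) - selected
--         if not additions:
--             break
--         selected |= additions
--     return selected
-- ===== SOURCE B (Python) =====
-- def _expand_tables_by_dependencies(
--     seed_tables: set[str],
--     fk_edges: list[tuple[str, str, str]],
--     mode: str,
--     recursive: bool,
-- ) -> set[str]:
--     selected = set(seed_tables)
--     if mode == "none":
--         return selected
--
--     # Build adjacency lists once: adj[x] = nodes added when x is selected.
--     adj: dict[str, list[str]] = {}
--     for child, parent, _ in fk_edges:
--         if mode in ("children", "both"):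
--             adj.setdefault(parent, []).append(child)
--         if mode in ("parents", "both"):
--             adj.setdefault(child, []).append(parent)
--
--     if not recursive:
--         for x in list(selected):
--             selected.update(adj.get(x, ()))
--         return selected
--
--     # Frontier BFS: each round only expands the newly reached nodes.
--     frontier = set(selected)
--     while frontier:
--         nxt = set()
--         for x in frontier:
--             for y in adj.get(x, ()):
--                 if y not in selected:
--                     nxt.add(y)
--         selected |= nxt
--         frontier = nxt
--     return selected
-- ===== Notes on version B (the rewrite author's own statement) =====
-- stated objective: alternative
-- what changed: A rescans the whole fk_edges list against the whole selected set on every saturation round; B builds adjacency lists once and then expands only the frontier of newly reached tables, BFS-style, traversing each adjacency entry at most once per node discovery.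
import Mathlib
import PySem

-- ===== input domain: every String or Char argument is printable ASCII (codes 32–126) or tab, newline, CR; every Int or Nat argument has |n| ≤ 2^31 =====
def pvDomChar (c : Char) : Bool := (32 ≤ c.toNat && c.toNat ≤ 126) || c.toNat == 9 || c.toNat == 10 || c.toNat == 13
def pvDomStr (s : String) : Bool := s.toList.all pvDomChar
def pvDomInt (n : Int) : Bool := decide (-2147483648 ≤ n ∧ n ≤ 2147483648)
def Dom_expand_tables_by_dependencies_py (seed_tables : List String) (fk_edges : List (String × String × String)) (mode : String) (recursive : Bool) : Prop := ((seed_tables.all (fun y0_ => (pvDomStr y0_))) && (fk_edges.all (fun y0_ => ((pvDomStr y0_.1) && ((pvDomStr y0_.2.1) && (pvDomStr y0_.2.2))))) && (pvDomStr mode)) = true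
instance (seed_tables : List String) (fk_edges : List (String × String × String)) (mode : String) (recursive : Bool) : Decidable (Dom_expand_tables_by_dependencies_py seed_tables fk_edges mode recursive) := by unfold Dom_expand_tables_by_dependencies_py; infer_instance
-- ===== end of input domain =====

-- B replaces A's repeated full scans of fk_edges (one per saturation round) by an adjacency
-- index built once plus frontier-BFS expansion of only the newly reached tables (alternative algorithm).
-- Both Pythons return a set[str]; the ports return it in the canonical sorted order
-- (set outputs are compared as finite sets, so the representation order is free).

-- ===== PORT A =====
-- Python: mode in {"children","both"} / mode in {"parents","both"} (appears verbatim in both sources)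
def pvModeChild (mode : String) : Bool := mode == "children" || mode == "both"
def pvModeParent (mode : String) : Bool := mode == "parents" || mode == "both"

-- body of step's 'for child, parent, _ in fk_edges' loop
def pvStepF (mode : String) (current : List String) (additions : List String) (e : String × String × String) : List String :=
  let a1 := if pvModeChild mode && current.contains e.2.1 then PySem.Set.add additions e.1 else additions
  if pvModeParent mode && current.contains e.1 then PySem.Set.add a1 e.2.1 else a1

-- step(current)
def pvStepA (fk_edges : List (String × String × String)) (mode : String) (current : List String) : List String :=
  fk_edges.foldl (pvStepF mode current) PySem.Set.empty

-- the 'while True' saturation loop; fuel 2*len(fk_edges)+1 provably suffices (each productive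
-- round adds a new edge endpoint), so this is the loop's exact value, not an approximation
def pvLoopA (fk_edges : List (String × String × String)) (mode : String) : Nat → List String → List String
  | 0, selected => selected
  | fuel+1, selected =>
    let additions := PySem.Set.diff (pvStepA fk_edges mode selected) selected
    if additions.isEmpty then selected
    else pvLoopA fk_edges mode fuel (PySem.Set.update selected additions)

def expand_tables_by_dependencies_py (seed_tables : List String) (fk_edges : List (String × String × String)) (mode : String) (recursive : Bool) : List String :=
  let selected := PySem.Set.ofList seed_tables
  if mode == "none" then PySem.List.sorted selected (fun x => x) false
  else if !recursive then
    PySem.List.sorted (PySem.Set.union selected (pvStepA fk_edges mode selected)) (fun x => x) false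
  else
    PySem.List.sorted (pvLoopA fk_edges mode (2 * fk_edges.length + 1) selected) (fun x => x) false

-- ===== PORT B =====
-- body of the adjacency-building loop: adj.setdefault(k, []).append(v)
def pvAdjF (mode : String) (adj : PySem.Dict String (List String)) (e : String × String × String) : PySem.Dict String (List String) :=
  let a1 := if pvModeChild mode then adj.insert e.2.1 (adj.getD e.2.1 [] ++ [e.1]) else adj
  if pvModeParent mode then a1.insert e.1 (a1.getD e.1 [] ++ [e.2.1]) else a1

def pvAdjB (fk_edges : List (String × String × String)) (mode : String) : PySem.Dict String (List String) :=
  fk_edges.foldl (pvAdjF mode) PySem.Dict.empty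

-- one BFS round: nxt = {y ∈ adj[x] for x in frontier if y not in selected}
def pvNext (adj : PySem.Dict String (List String)) (selected frontier : List String) : List String :=
  frontier.foldl (fun nxt x =>
    (adj.getD x []).foldl (fun nxt y => if selected.contains y then nxt else PySem.Set.add nxt y) nxt)
    PySem.Set.empty

-- the 'while frontier' loop, same provably sufficient fuel
def pvLoopB (adj : PySem.Dict String (List String)) : Nat → List String → List String → List String
  | 0, selected, _ => selected
  | fuel+1, selected, frontier =>
    if frontier.isEmpty then selected
    else
      let nxt := pvNext adj selected frontier
      pvLoopB adj fuel (PySem.Set.update selected nxt) nxt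

def expand_tables_by_dependencies_py_alt (seed_tables : List String) (fk_edges : List (String × String × String)) (mode : String) (recursive : Bool) : List String :=
  let selected := PySem.Set.ofList seed_tables
  if mode == "none" then PySem.List.sorted selected (fun x => x) false
  else
    let adj := pvAdjB fk_edges mode
    if !recursive then
      PySem.List.sorted (selected.foldl (fun s x => PySem.Set.update s (adj.getD x [])) selected) (fun x => x) false
    else
      PySem.List.sorted (pvLoopB adj (2 * fk_edges.length + 1) selected selected) (fun x => x) false

-- ===== PRECONDITION & SPEC =====
def Spec_expand_tables_by_dependencies_py (seed_tables : List String) (fk_edges : List (String × String × String)) (mode : String) (recursive : Bool) (out : List String) : Prop := out = expand_tables_by_dependencies_py_alt seed_tables fk_edges mode recursive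
instance (seed_tables : List String) (fk_edges : List (String × String × String)) (mode : String) (recursive : Bool) (out : List String) : Decidable (Spec_expand_tables_by_dependencies_py seed_tables fk_edges mode recursive out) := by unfold Spec_expand_tables_by_dependencies_py; infer_instance

-- ===== CLAIM (what is proved, stated in full; the proofs are below) =====
def Claim_equal_expand_tables_by_dependencies_py : Prop := ∀ (seed_tables : List String) (fk_edges : List (String × String × String)) (mode : String) (recursive : Bool), Dom_expand_tables_by_dependencies_py seed_tables fk_edges mode recursive → Spec_expand_tables_by_dependencies_py seed_tables fk_edges mode recursive (expand_tables_by_dependencies_py seed_tables fk_edges mode recursive)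

-- ===== LEMMAS AND PROOFS =====

-- the one-step "x selected makes y selectable" relation both programs realise
def pvNbr (fk_edges : List (String × String × String)) (mode : String) (x y : String) : Prop :=
  ∃ e ∈ fk_edges, (pvModeChild mode = true ∧ x = e.2.1 ∧ y = e.1) ∨ (pvModeParent mode = true ∧ x = e.1 ∧ y = e.2.1)

def pvClosed (fk_edges : List (String × String × String)) (mode : String) (S : List String) : Prop :=
  ∀ x y, x ∈ S → pvNbr fk_edges mode x y → y ∈ S

-- all edge endpoints (every node a round can add lies here)
def pvU (fk_edges : List (String × String × String)) : List String := fk_edges.flatMap (fun e => [e.1, e.2.1])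

def pvMeas (fk_edges : List (String × String × String)) (S : List String) : Nat :=
  ((pvU fk_edges).toFinset \ S.toFinset).card

lemma pvNbr_cons {e : String × String × String} {E : List (String × String × String)} {M x y : String} :
    pvNbr (e :: E) M x y ↔ ((pvModeChild M = true ∧ x = e.2.1 ∧ y = e.1) ∨ (pvModeParent M = true ∧ x = e.1 ∧ y = e.2.1)) ∨ pvNbr E M x y := by
  simp [pvNbr, or_assoc]

lemma pvNbr_mem_pvU {E : List (String × String × String)} {M x y : String} (h : pvNbr E M x y) : y ∈ pvU E := by
  obtain ⟨e, he, h | h⟩ := h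
  · simp only [pvU, List.mem_flatMap]; exact ⟨e, he, by simp [h.2.2]⟩
  · simp only [pvU, List.mem_flatMap]; exact ⟨e, he, by simp [h.2.2]⟩

lemma mem_pvStepF {M : String} {cur acc : List String} {e : String × String × String} {y : String} :
    y ∈ pvStepF M cur acc e ↔ y ∈ acc ∨ ((pvModeChild M = true ∧ e.2.1 ∈ cur ∧ y = e.1) ∨ (pvModeParent M = true ∧ e.1 ∈ cur ∧ y = e.2.1)) := by
  simp only [pvStepF]
  split_ifs with h1 h2 h2 <;>
    simp_all [PySem.Set.mem_add, List.contains_eq_mem] <;> tauto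

lemma mem_pvStepA_aux {M : String} {cur : List String} {y : String} :
    ∀ (E : List (String × String × String)) (acc : List String),
      y ∈ E.foldl (pvStepF M cur) acc ↔ y ∈ acc ∨ ∃ x, x ∈ cur ∧ pvNbr E M x y := by
  intro E
  induction E with
  | nil => simp [pvNbr]
  | cons e E ih =>
    intro acc
    rw [List.foldl_cons, ih, mem_pvStepF]
    constructor
    · rintro ((h | (⟨hm, hc, rfl⟩ | ⟨hm, hc, rfl⟩)) | ⟨x, hx, hn⟩)
      · exact Or.inl h
      · exact Or.inr ⟨e.2.1, hc, pvNbr_cons.mpr (Or.inl (Or.inl ⟨hm, rfl, rfl⟩))⟩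
      · exact Or.inr ⟨e.1, hc, pvNbr_cons.mpr (Or.inl (Or.inr ⟨hm, rfl, rfl⟩))⟩
      · exact Or.inr ⟨x, hx, pvNbr_cons.mpr (Or.inr hn)⟩
    · rintro (h | ⟨x, hx, hn⟩)
      · exact Or.inl (Or.inl h)
      · rcases pvNbr_cons.mp hn with ((⟨hm, rfl, rfl⟩ | ⟨hm, rfl, rfl⟩) | hn)
        · exact Or.inl (Or.inr (Or.inl ⟨hm, hx, rfl⟩))
        · exact Or.inl (Or.inr (Or.inr ⟨hm, hx, rfl⟩))
        · exact Or.inr ⟨x, hx, hn⟩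

lemma mem_pvStepA {E : List (String × String × String)} {M : String} {cur : List String} {y : String} :
    y ∈ pvStepA E M cur ↔ ∃ x, x ∈ cur ∧ pvNbr E M x y := by
  unfold pvStepA
  rw [mem_pvStepA_aux]
  simp [PySem.Set.empty]

-- adjacency-dict characterisation: y ∈ adj[x] (as a set) ↔ pvNbr x y
lemma getD_pvAdjF {M : String} {d : PySem.Dict String (List String)} {e : String × String × String} {x y : String} :
    (y ∈ (pvAdjF M d e).getD x []) ↔ y ∈ d.getD x [] ∨ ((pvModeChild M = true ∧ x = e.2.1 ∧ y = e.1) ∨ (pvModeParent M = true ∧ x = e.1 ∧ y = e.2.1)) := by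
  simp only [pvAdjF]
  split_ifs with h1 h2 h2 <;>
    simp_all [PySem.Dict.getD_insert] <;> split_ifs <;> simp_all

lemma getD_pvAdjB_aux {M : String} {x y : String} :
    ∀ (E : List (String × String × String)) (d : PySem.Dict String (List String)),
      y ∈ (E.foldl (pvAdjF M) d).getD x [] ↔ y ∈ d.getD x [] ∨ pvNbr E M x y := by
  intro E
  induction E with
  | nil => simp [pvNbr]
  | cons e E ih =>
    intro d
    rw [List.foldl_cons, ih, getD_pvAdjF, pvNbr_cons]
    tauto

lemma getD_pvAdjB {E : List (String × String × String)} {M : String} {x y : String} :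
    y ∈ (pvAdjB E M).getD x [] ↔ pvNbr E M x y := by
  unfold pvAdjB
  rw [getD_pvAdjB_aux]
  simp [PySem.Dict.getD_empty]

-- one BFS round
lemma mem_pvNext_inner {sel : List String} {y : String} :
    ∀ (l acc : List String),
      y ∈ l.foldl (fun nxt y' => if sel.contains y' then nxt else PySem.Set.add nxt y') acc ↔ y ∈ acc ∨ (y ∈ l ∧ y ∉ sel) := by
  intro l
  induction l with
  | nil => simp
  | cons z l ih =>
    intro acc
    rw [List.foldl_cons]
    by_cases h : z ∈ sel
    · rw [if_pos (by simp [h]), ih]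
      constructor
      · rintro (ha | ⟨h1, h2⟩)
        · exact Or.inl ha
        · exact Or.inr ⟨List.mem_cons_of_mem _ h1, h2⟩
      · rintro (ha | ⟨h1, h2⟩)
        · exact Or.inl ha
        · rcases List.mem_cons.mp h1 with rfl | h1
          · exact absurd h h2
          · exact Or.inr ⟨h1, h2⟩
    · rw [if_neg (by simp [h]), ih, PySem.Set.mem_add]
      constructor
      · rintro ((ha | rfl) | ⟨h1, h2⟩)
        · exact Or.inl ha
        · exact Or.inr ⟨List.mem_cons_self, h⟩
        · exact Or.inr ⟨List.mem_cons_of_mem _ h1, h2⟩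
      · rintro (ha | ⟨h1, h2⟩)
        · exact Or.inl (Or.inl ha)
        · rcases List.mem_cons.mp h1 with rfl | h1
          · exact Or.inl (Or.inr rfl)
          · exact Or.inr ⟨h1, h2⟩

lemma mem_pvNext_aux {adj : PySem.Dict String (List String)} {sel : List String} {y : String} :
    ∀ (fr acc : List String),
      y ∈ fr.foldl (fun nxt x => (adj.getD x []).foldl (fun nxt y' => if sel.contains y' then nxt else PySem.Set.add nxt y') nxt) acc
        ↔ y ∈ acc ∨ (y ∉ sel ∧ ∃ x ∈ fr, y ∈ adj.getD x []) := by
  intro fr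
  induction fr with
  | nil => simp
  | cons x fr ih =>
    intro acc
    rw [List.foldl_cons, ih, mem_pvNext_inner]
    constructor
    · rintro ((h | ⟨h1, h2⟩) | ⟨h1, x', hx', h2⟩)
      · exact Or.inl h
      · exact Or.inr ⟨h2, x, by simp, h1⟩
      · exact Or.inr ⟨h1, x', by simp [hx'], h2⟩
    · rintro (h | ⟨h1, x', hx', h2⟩)
      · exact Or.inl (Or.inl h)
      · rcases List.mem_cons.mp hx' with rfl | hx'
        · exact Or.inl (Or.inr ⟨h2, h1⟩)
        · exact Or.inr ⟨h1, x', hx', h2⟩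

lemma mem_pvNext {E : List (String × String × String)} {M : String} {sel fr : List String} {y : String} :
    y ∈ pvNext (pvAdjB E M) sel fr ↔ y ∉ sel ∧ ∃ x ∈ fr, pvNbr E M x y := by
  unfold pvNext
  rw [mem_pvNext_aux]
  simp only [PySem.Set.empty, List.not_mem_nil, false_or]
  constructor
  · rintro ⟨h1, x, hx, h2⟩; exact ⟨h1, x, hx, getD_pvAdjB.mp h2⟩
  · rintro ⟨h1, x, hx, h2⟩; exact ⟨h1, x, hx, getD_pvAdjB.mpr h2⟩

-- measure decreases when a new edge endpoint is added
lemma pvMeas_lt {E : List (String × String × String)} {sel sel' : List String} {a : String}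
    (hsub : ∀ z, z ∈ sel → z ∈ sel') (ha : a ∈ pvU E) (hnot : a ∉ sel) (hin : a ∈ sel') :
    pvMeas E sel' < pvMeas E sel := by
  apply Finset.card_lt_card
  constructor
  · intro z hz
    simp only [Finset.mem_sdiff, List.mem_toFinset] at *
    exact ⟨hz.1, fun h => hz.2 (hsub z h)⟩
  · intro hsup
    have := hsup (by simp [Finset.mem_sdiff, List.mem_toFinset, ha, hnot] : a ∈ (pvU E).toFinset \ sel.toFinset)
    simp [Finset.mem_sdiff, List.mem_toFinset, hin] at this

lemma pvMeas_le {E : List (String × String × String)} {sel : List String} :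
    pvMeas E sel ≤ 2 * E.length := by
  calc pvMeas E sel ≤ (pvU E).toFinset.card := Finset.card_le_card (Finset.sdiff_subset)
    _ ≤ (pvU E).length := (pvU E).toFinset_card_le
    _ = 2 * E.length := by
      induction E with
      | nil => simp [pvU]
      | cons e E ih => simp [pvU, List.flatMap_cons] at *; omega

-- A's saturation loop: with enough fuel the result is the least pvNbr-closed superset
lemma pvLoopA_spec {E : List (String × String × String)} {M : String} :
    ∀ (fuel : Nat) (sel : List String), sel.Nodup → pvMeas E sel < fuel →
      (pvLoopA E M fuel sel).Nodup ∧ (∀ z, z ∈ sel → z ∈ pvLoopA E M fuel sel) ∧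
      pvClosed E M (pvLoopA E M fuel sel) ∧
      (∀ T, (∀ z, z ∈ sel → z ∈ T) → pvClosed E M T → ∀ z, z ∈ pvLoopA E M fuel sel → z ∈ T) := by
  intro fuel
  induction fuel with
  | zero => intro sel _ h; omega
  | succ fuel ih =>
    intro sel hnd hm
    rw [pvLoopA]
    by_cases he : (PySem.Set.diff (pvStepA E M sel) sel).isEmpty
    · rw [if_pos he]
      have hemp : ∀ z, z ∉ PySem.Set.diff (pvStepA E M sel) sel := by
        intro z hz
        rw [List.isEmpty_iff] at he
        simp [he] at hz
      refine ⟨hnd, fun z h => h, ?_, fun T hT _ z hz => hT z hz⟩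
      intro x y hx hn
      by_contra hy
      exact hemp y (by rw [PySem.Set.mem_diff]; exact ⟨mem_pvStepA.mpr ⟨x, hx, hn⟩, hy⟩)
    · rw [if_neg he]
      set adds := PySem.Set.diff (pvStepA E M sel) sel with hadds
      have hmem : ∀ z, z ∈ adds ↔ (z ∈ pvStepA E M sel ∧ z ∉ sel) := fun z => PySem.Set.mem_diff _ _ _
      have hne : adds ≠ [] := by
        intro h; rw [h] at he; simp at he
      obtain ⟨a, ha⟩ := List.exists_mem_of_ne_nil adds hne
      have haS := (hmem a).mp ha
      have hsub : ∀ z, z ∈ sel → z ∈ PySem.Set.update sel adds := by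
        intro z hz; rw [PySem.Set.mem_update]; exact Or.inl hz
      have hmeas : pvMeas E (PySem.Set.update sel adds) < pvMeas E sel := by
        apply pvMeas_lt hsub _ haS.2 (by rw [PySem.Set.mem_update]; exact Or.inr ha)
        obtain ⟨x, _, hn⟩ := mem_pvStepA.mp haS.1
        exact pvNbr_mem_pvU hn
      obtain ⟨h1, h2, h3, h4⟩ := ih (PySem.Set.update sel adds) (PySem.Set.nodup_update _ _ hnd) (by omega)
      refine ⟨h1, fun z hz => h2 z (hsub z hz), h3, ?_⟩
      intro T hT hTc z hz
      apply h4 T _ hTc z hz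
      intro z' hz'
      rw [PySem.Set.mem_update] at hz'
      rcases hz' with h | h
      · exact hT z' h
      · obtain ⟨x, hx, hn⟩ := mem_pvStepA.mp ((hmem z').mp h).1
        exact hTc x z' (hT x hx) hn

-- B's BFS loop: same characterisation, under the frontier invariant
lemma pvLoopB_spec {E : List (String × String × String)} {M : String} :
    ∀ (fuel : Nat) (sel fr : List String), sel.Nodup → (∀ x, x ∈ fr → x ∈ sel) →
      (∀ x y, x ∈ sel → x ∉ fr → pvNbr E M x y → y ∈ sel) →
      (fr = [] ∨ pvMeas E sel < fuel) →
      (pvLoopB (pvAdjB E M) fuel sel fr).Nodup ∧ (∀ z, z ∈ sel → z ∈ pvLoopB (pvAdjB E M) fuel sel fr) ∧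
      pvClosed E M (pvLoopB (pvAdjB E M) fuel sel fr) ∧
      (∀ T, (∀ z, z ∈ sel → z ∈ T) → pvClosed E M T → ∀ z, z ∈ pvLoopB (pvAdjB E M) fuel sel fr → z ∈ T) := by
  intro fuel
  induction fuel with
  | zero =>
    intro sel fr hnd hfr hsc hcase
    rcases hcase with rfl | h
    · rw [pvLoopB]
      exact ⟨hnd, fun z h => h, fun x y hx hn => hsc x y hx (by simp) hn, fun T hT _ z hz => hT z hz⟩
    · omega
  | succ fuel ih =>
    intro sel fr hnd hfr hsc hcase
    rw [pvLoopB]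
    by_cases he : fr.isEmpty
    · rw [if_pos he]
      rw [List.isEmpty_iff] at he
      subst he
      exact ⟨hnd, fun z h => h, fun x y hx hn => hsc x y hx (by simp) hn, fun T hT _ z hz => hT z hz⟩
    · rw [if_neg he]
      set nxt := pvNext (pvAdjB E M) sel fr with hnxt
      have hmemn : ∀ z, z ∈ nxt ↔ (z ∉ sel ∧ ∃ x ∈ fr, pvNbr E M x z) := fun z => mem_pvNext
      have hsub : ∀ z, z ∈ sel → z ∈ PySem.Set.update sel nxt := by
        intro z hz; rw [PySem.Set.mem_update]; exact Or.inl hz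
      have hfr' : ∀ x, x ∈ nxt → x ∈ PySem.Set.update sel nxt := by
        intro z hz; rw [PySem.Set.mem_update]; exact Or.inr hz
      have hsc' : ∀ x y, x ∈ PySem.Set.update sel nxt → x ∉ nxt → pvNbr E M x y → y ∈ PySem.Set.update sel nxt := by
        intro x y hx hxn hn
        rw [PySem.Set.mem_update] at hx
        rcases hx with hx | hx
        · by_cases hxf : x ∈ fr
          · by_cases hys : y ∈ sel
            · exact hsub y hys
            · exact hfr' y ((hmemn y).mpr ⟨hys, x, hxf, hn⟩)
          · exact hsub y (hsc x y hx hxf hn)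
        · exact absurd hx hxn
      have hcase' : nxt = [] ∨ pvMeas E (PySem.Set.update sel nxt) < fuel := by
        by_cases hne : nxt = []
        · exact Or.inl hne
        · right
          obtain ⟨a, ha⟩ := List.exists_mem_of_ne_nil nxt hne
          have haP := (hmemn a).mp ha
          obtain ⟨x, _, hn⟩ := haP.2
          have : pvMeas E (PySem.Set.update sel nxt) < pvMeas E sel :=
            pvMeas_lt hsub (pvNbr_mem_pvU hn) haP.1 (hfr' a ha)
          rcases hcase with rfl | hm
          · exact absurd he (by simp)
          · omega
      obtain ⟨h1, h2, h3, h4⟩ := ih (PySem.Set.update sel nxt) nxt (PySem.Set.nodup_update _ _ hnd) hfr' hsc' hcase'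
      refine ⟨h1, fun z hz => h2 z (hsub z hz), h3, ?_⟩
      intro T hT hTc z hz
      apply h4 T _ hTc z hz
      intro z' hz'
      rw [PySem.Set.mem_update] at hz'
      rcases hz' with h | h
      · exact hT z' h
      · obtain ⟨_, x, hx, hn⟩ := (hmemn z').mp h
        exact hTc x z' (hT x (hfr x hx)) hn

-- B's non-recursive pass
lemma mem_foldl_update {adj : PySem.Dict String (List String)} {y : String} :
    ∀ (l acc : List String),
      y ∈ l.foldl (fun s x => PySem.Set.update s (adj.getD x [])) acc ↔ y ∈ acc ∨ ∃ x ∈ l, y ∈ adj.getD x [] := by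
  intro l
  induction l with
  | nil => simp
  | cons x l ih =>
    intro acc
    rw [List.foldl_cons, ih, PySem.Set.mem_update]
    simp only [List.mem_cons]
    constructor
    · rintro ((h | h) | ⟨x', hx', h⟩)
      · exact Or.inl h
      · exact Or.inr ⟨x, Or.inl rfl, h⟩
      · exact Or.inr ⟨x', Or.inr hx', h⟩
    · rintro (h | ⟨x', (rfl | hx'), h⟩)
      · exact Or.inl (Or.inl h)
      · exact Or.inl (Or.inr h)
      · exact Or.inr ⟨x', hx', h⟩

lemma nodup_foldl_update {adj : PySem.Dict String (List String)} :
    ∀ (l acc : List String), acc.Nodup → (l.foldl (fun s x => PySem.Set.update s (adj.getD x [])) acc).Nodup := by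
  intro l
  induction l with
  | nil => intro acc h; exact h
  | cons x l ih =>
    intro acc h
    rw [List.foldl_cons]
    exact ih _ (PySem.Set.nodup_update _ _ h)

-- two Nodup lists with the same members have the same sorted listing
lemma sorted_eq_of_same_mem {S1 S2 : List String} (h1 : S1.Nodup) (h2 : S2.Nodup)
    (h : ∀ y, y ∈ S1 ↔ y ∈ S2) :
    PySem.List.sorted S1 (fun x => x) false = PySem.List.sorted S2 (fun x => x) false := by
  have hperm : S2.Perm S1 := (List.perm_ext_iff_of_nodup h2 h1).mpr (fun a => (h a).symm)
  have hps : (PySem.List.sorted S2 (fun x => x) false).Perm S1 :=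
    (PySem.List.sorted_perm S2 (fun x => x) false).trans hperm
  have hle : (PySem.List.sorted S2 (fun x => x) false).Pairwise (fun a b => a ≤ b) :=
    PySem.List.sorted_pairwise S2 (fun x => x)
  have hnd : (PySem.List.sorted S2 (fun x => x) false).Nodup :=
    ((PySem.List.sorted_perm S2 (fun x => x) false).nodup_iff).mpr h2
  exact PySem.List.sorted_eq_of_perm_of_pairwise_lt S1 (PySem.List.sorted S2 (fun x => x) false)
    (fun x => x) hps ((hle.and hnd).imp (fun h => lt_of_le_of_ne h.1 h.2))

-- ===== VERDICT (by name: the statement is the Claim_ definition above) =====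
theorem expand_tables_by_dependencies_py_spec : Claim_equal_expand_tables_by_dependencies_py := by
  intro seeds E M rec _
  unfold Spec_expand_tables_by_dependencies_py
  unfold expand_tables_by_dependencies_py expand_tables_by_dependencies_py_alt
  by_cases hm : (M == "none") = true
  · simp only [hm, if_pos]
  · simp only [hm, Bool.false_eq_true, if_false]
    cases rec with
    | false =>
      simp only [Bool.not_false, if_pos]
      apply sorted_eq_of_same_mem
      · exact PySem.Set.nodup_union _ _ (PySem.Set.nodup_ofList _)
      · exact nodup_foldl_update _ _ (PySem.Set.nodup_ofList _)
      · intro y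
        rw [PySem.Set.mem_union, mem_foldl_update, mem_pvStepA]
        constructor
        · rintro (h | ⟨x, hx, hn⟩)
          · exact Or.inl h
          · exact Or.inr ⟨x, hx, getD_pvAdjB.mpr hn⟩
        · rintro (h | ⟨x, hx, hn⟩)
          · exact Or.inl h
          · exact Or.inr ⟨x, hx, getD_pvAdjB.mp hn⟩
    | true =>
      simp only [Bool.not_true, Bool.false_eq_true, if_false]
      have hmA : pvMeas E (PySem.Set.ofList seeds) < 2 * E.length + 1 := by
        have := pvMeas_le (E := E) (sel := PySem.Set.ofList seeds)
        omega
      obtain ⟨a1, a2, a3, a4⟩ := pvLoopA_spec (E := E) (M := M) (2 * E.length + 1)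
        (PySem.Set.ofList seeds) (PySem.Set.nodup_ofList _) hmA
      obtain ⟨b1, b2, b3, b4⟩ := pvLoopB_spec (E := E) (M := M) (2 * E.length + 1)
        (PySem.Set.ofList seeds) (PySem.Set.ofList seeds) (PySem.Set.nodup_ofList _)
        (fun x h => h) (fun x y _ hxf hn => absurd hn (by tauto)) (Or.inr hmA)
      apply sorted_eq_of_same_mem a1 b1
      intro y
      constructor
      · exact a4 _ b2 b3 y
      · exact b4 _ a2 a3 y
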